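-- pv_equiv track=rewrite | github.com/geranium-0019/sbas_pipeline | workdir/steps/step_07_run_mintpy.py | _path_dir_hint
-- ===== SOURCE A (Python) =====
-- from typing import Any, Dict, List, Mapping, Tuple, Optional
--
-- _GLOB_CHARS = set("*?[")
--
-- def _looks_like_path_value(value: str) -> bool:
--     v = (value or "").strip()
--     if not v:
--         return False
--     vlow = v.lower()
--     if vlow in {"auto", "no", "none"}:
--         return False
--     return True
--
-- def _path_dir_hint(value: str) -> Optional[str]:
--     """Return a directory-ish part of a path pattern for existence checking.
--
--     Examples:
--       ../reference/IW*.xml -> ../reference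
--       ../merged/interferograms/*/filt_*.unw -> ../merged/interferograms
--       ../merged/geom_reference/los.rdr -> ../merged/geom_reference
--     """
--     v = (value or "").strip()
--     if not _looks_like_path_value(v):
--         return None
--
--     # Chop at first glob char to get a stable prefix.
--     first_glob = None
--     for i, ch in enumerate(v):
--         if ch in _GLOB_CHARS:
--             first_glob = i
--             break
--     prefix = v if first_glob is None else v[:first_glob]
--
--     # Use directory part of the prefix
--     if "/" in prefix:
--         d = prefix.rsplit("/", 1)[0]
--         return d if d else None
--     return None
-- ===== SOURCE B (Python) =====
-- from typing import Optional
--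
-- _GLOB_CHARS = set("*?[")
--
-- def _looks_like_path_value(value: str) -> bool:
--     v = (value or "").strip()
--     if not v:
--         return False
--     vlow = v.lower()
--     if vlow in {"auto", "no", "none"}:
--         return False
--     return True
--
-- def _path_dir_hint(value: str) -> Optional[str]:
--     v = (value or "").strip()
--     if not _looks_like_path_value(v):
--         return None
--     # Split into components; cut before the first component that contains a
--     # glob character (or before the last component if none does), and join.
--     parts = v.split("/")
--     cut = len(parts) - 1
--     for i, p in enumerate(parts):
--         if any(ch in _GLOB_CHARS for ch in p):
--             cut = i
--             break
--     d = "/".join(parts[:cut])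
--     return d or None
-- ===== Notes on version B (the rewrite author's own statement) =====
-- stated objective: alternative
-- what changed: Replaces A's char-scan for the first glob char plus slice plus rsplit with a component-wise algorithm: split the path on '/', locate the first component containing a glob character (or the last component if none), and join the components before that cut.
import Mathlib
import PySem

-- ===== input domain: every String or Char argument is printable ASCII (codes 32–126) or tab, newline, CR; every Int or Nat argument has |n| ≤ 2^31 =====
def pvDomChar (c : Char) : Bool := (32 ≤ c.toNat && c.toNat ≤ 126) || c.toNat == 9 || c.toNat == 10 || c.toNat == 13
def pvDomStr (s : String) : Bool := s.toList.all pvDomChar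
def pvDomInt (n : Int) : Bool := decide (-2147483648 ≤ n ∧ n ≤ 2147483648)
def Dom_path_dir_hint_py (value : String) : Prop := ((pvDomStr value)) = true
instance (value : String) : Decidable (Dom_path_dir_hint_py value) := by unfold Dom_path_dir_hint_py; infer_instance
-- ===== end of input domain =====

-- B replaces A's char-scan + slice + rsplit with split-on-'/' / find the first glob component / join
-- the components before it — an alternative decomposition of the same O(n) task (return value only).

-- ===== PORT A =====
-- ch in _GLOB_CHARS  (set("*?["))
def pvGlobChar (c : Char) : Bool := c == '*' || c == '?' || c == '['

-- _looks_like_path_value (shared module helper, called unchanged by both A and B)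
def pvLooksLikePathValue (value : String) : Bool :=
  let v := PySem.Str.strip value
  if v.toList = [] then false
  else
    let vlow := PySem.Str.lower v
    if vlow == "auto" || vlow == "no" || vlow == "none" then false
    else true

-- A's 'for i, ch in enumerate(v): if ch in _GLOB_CHARS: first_glob = i; break'
def pvFirstGlob : List Char → Nat → Option Nat
  | [], _ => none
  | c :: rest, i => if pvGlobChar c then some i else pvFirstGlob rest (i + 1)

-- prefix.rsplit("/", 1)[0], ported by hand (exact: scan from the right for the last '/';
-- when no '/' occurs the whole string is piece [0])
def pvRsplitHead (p : List Char) : List Char :=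
  match List.dropWhile (fun c => !(c == '/')) p.reverse with
  | [] => p
  | _ :: rest => rest.reverse

def path_dir_hint_py (value : String) : Option String :=
  let v := PySem.Str.strip value
  if ¬ pvLooksLikePathValue v then none
  else
    let cs := v.toList
    let pfx := match pvFirstGlob cs 0 with
      | none => cs
      | some i => PySem.Chars.slice cs none (some (i : Int))   -- v[:first_glob]
    if PySem.Chars.isIn ['/'] pfx then
      let d := pvRsplitHead pfx
      if d = [] then none else some (String.ofList d)
    else none

-- ===== PORT B =====
-- B's 'cut = len(parts)-1; for i, p in enumerate(parts): if any(...): cut = i; break'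
def pvCutIndex : List (List Char) → Nat
  | [] => 0
  | p :: ps => if p.any pvGlobChar then 0 else if ps = [] then 0 else pvCutIndex ps + 1

def path_dir_hint_py_alt (value : String) : Option String :=
  let v := PySem.Str.strip value
  if ¬ pvLooksLikePathValue v then none
  else
    let parts := PySem.Chars.splitOn v.toList ['/']           -- v.split("/")
    let cut := pvCutIndex parts
    let d := PySem.Chars.join ['/'] (PySem.List.slice parts none (some (cut : Int)))  -- "/".join(parts[:cut])
    if d = [] then none else some (String.ofList d)

-- ===== PRECONDITION & SPEC =====
def Spec_path_dir_hint_py (value : String) (out : Option String) : Prop := out = path_dir_hint_py_alt value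
instance (value : String) (out : Option String) : Decidable (Spec_path_dir_hint_py value out) := by unfold Spec_path_dir_hint_py; infer_instance

-- ===== CLAIM (what is proved, stated in full; the proofs are below) =====
def Claim_equal_path_dir_hint_py : Prop := ∀ (value : String), Dom_path_dir_hint_py value → Spec_path_dir_hint_py value (path_dir_hint_py value)

-- ===== LEMMAS AND PROOFS =====

-- the two cores, on the character list of the stripped string (proof-side abbreviations)
def pvCoreA (cs : List Char) : Option (List Char) :=
  let pfx := cs.takeWhile (fun c => !pvGlobChar c)
  if '/' ∈ pfx then some (pvRsplitHead pfx) else none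

def pvCoreB (cs : List Char) : Option (List Char) :=
  let cut := pvCutIndex (cs.splitOnP (· == '/'))
  if cut = 0 then none
  else some (PySem.Chars.join ['/'] ((cs.splitOnP (· == '/')).take cut))

theorem pvFirstGlob_shift (cs : List Char) (i : Nat) :
    pvFirstGlob cs i = (pvFirstGlob cs 0).map (· + i) := by
  induction cs generalizing i with
  | nil => rfl
  | cons c rest ih =>
    by_cases h : pvGlobChar c
    · simp [pvFirstGlob, h]
    · simp only [pvFirstGlob, h, if_false, Bool.false_eq_true]
      rw [ih (i + 1), ih 1]
      cases pvFirstGlob rest 0 <;> (simp; try omega)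

-- A's chopped prefix is the longest glob-free prefix
theorem pvPrefix_eq (cs : List Char) :
    (match pvFirstGlob cs 0 with
      | none => cs
      | some i => cs.take i) = cs.takeWhile (fun c => !pvGlobChar c) := by
  induction cs with
  | nil => rfl
  | cons c rest ih =>
    by_cases h : pvGlobChar c
    · simp [pvFirstGlob, h]
    · simp only [pvFirstGlob, h, if_false, Bool.false_eq_true]
      rw [pvFirstGlob_shift rest 1]
      rw [List.takeWhile_cons_of_pos (by simp [h])]
      cases hr : pvFirstGlob rest 0 with
      | none => simpa [hr] using ih
      | some j => simpa [hr] using ih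

theorem pvSplitGo_single (c : Char) :
    ∀ fuel (l cur : List Char) (_ : l.length < fuel) (acc2 : List (List Char)),
      PySem.Chars.splitOn.go [c] fuel l cur acc2 =
        acc2.reverse ++ (l.splitOnP (· == c)).modifyHead (cur.reverse ++ ·) := by
  intro fuel
  induction fuel with
  | zero => intro l cur h; exact absurd h (by omega)
  | succ f ih =>
    intro l cur h acc2
    cases l with
    | nil =>
      rw [PySem.Chars.splitOn.go]
      simp [List.splitOnP_nil]
      exact fun h' => absurd h' (by omega)
    | cons c' rest =>
      rw [PySem.Chars.splitOn.go]
      by_cases hc : c = c'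
      · subst hc
        simp only [List.isPrefixOf, Bool.and_true, beq_self_eq_true, if_true]
        rw [ih _ _ (by simpa using Nat.lt_of_succ_lt_succ h) _]
        rw [List.splitOnP_cons]
        cases hs : List.splitOnP (fun x => x == c) rest with
        | nil => exact absurd hs (List.splitOnP_ne_nil _ _)
        | cons hd tl => simp [hs]
      · have hb : (c == c') = false := beq_eq_false_iff_ne.mpr hc
        have hb2 : (c' == c) = false := beq_eq_false_iff_ne.mpr (Ne.symm hc)
        simp only [List.isPrefixOf, hb, Bool.false_and, Bool.false_eq_true, if_false]
        rw [ih _ _ (by simp at h ⊢; omega) _]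
        rw [List.splitOnP_cons]
        simp only [hb2, Bool.false_eq_true, if_false]
        cases hs : List.splitOnP (fun x => x == c) rest with
        | nil => exact absurd hs (List.splitOnP_ne_nil _ _)
        | cons hd tl => simp

-- Python's v.split(sep) for a one-char sep is List.splitOnP on that char
theorem pvSplitOn_single (cs : List Char) (c : Char) :
    PySem.Chars.splitOn cs [c] = cs.splitOnP (· == c) := by
  rw [PySem.Chars.splitOn, pvSplitGo_single c _ _ _ (Nat.lt_succ_self _) _]
  cases hs : List.splitOnP (fun x => x == c) cs with
  | nil => exact absurd hs (List.splitOnP_ne_nil _ _)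
  | cons hd tl => simp

theorem pvSplit_no_sep {cs : List Char} {c : Char} (h : c ∉ cs) :
    cs.splitOnP (· == c) = [cs] := by
  induction cs with
  | nil => rfl
  | cons a rest ih =>
    have ha : (a == c) = false := beq_eq_false_iff_ne.mpr (fun hh => by simp_all)
    rw [List.splitOnP_cons]
    simp only [ha, Bool.false_eq_true, if_false]
    rw [ih (fun hm => h (List.mem_cons_of_mem _ hm))]
    rfl

theorem pvSplit_sep_append {a : List Char} (r : List Char) {c : Char} (h : c ∉ a) :
    (a ++ c :: r).splitOnP (· == c) = a :: r.splitOnP (· == c) := by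
  induction a with
  | nil => simp [List.splitOnP_cons]
  | cons x a' ih =>
    have hx : (x == c) = false := beq_eq_false_iff_ne.mpr (fun hh => by simp_all)
    rw [List.cons_append, List.splitOnP_cons]
    simp only [hx, Bool.false_eq_true, if_false]
    rw [ih (fun hm => h (List.mem_cons_of_mem _ hm))]
    rfl

-- rsplit("/",1)[0] when the LAST '/' is the shown one
theorem pvRsplit_last {a q : List Char} (hq : '/' ∉ q) :
    pvRsplitHead (a ++ '/' :: q) = a := by
  have h1 : List.dropWhile (fun c => !(c == '/')) q.reverse = [] :=
    List.dropWhile_eq_nil_iff.mpr (fun x hx => by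
      simp only [List.mem_reverse] at hx
      simp
      exact fun h => hq (h ▸ hx))
  unfold pvRsplitHead
  rw [List.reverse_append, List.reverse_cons, List.append_assoc, List.dropWhile_append]
  simp [h1]

-- rsplit("/",1)[0] recursion step past a '/' that is not the last one
theorem pvRsplit_step {a q : List Char} (hq : '/' ∈ q) :
    pvRsplitHead (a ++ '/' :: q) = a ++ '/' :: pvRsplitHead q := by
  have hne : List.dropWhile (fun c => !(c == '/')) q.reverse ≠ [] := by
    intro h0
    have := List.dropWhile_eq_nil_iff.mp h0 '/' (by simpa using hq)
    simp at this
  cases hd : List.dropWhile (fun c => !(c == '/')) q.reverse with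
  | nil => exact absurd hd hne
  | cons y t =>
    have hy : y = '/' := by
      have := List.head?_dropWhile_not (fun c => !(c == '/')) q.reverse
      rw [hd] at this
      simpa using this
    unfold pvRsplitHead
    rw [List.reverse_append, List.reverse_cons, List.append_assoc, List.dropWhile_append]
    simp only [hd, hy, List.isEmpty_cons, if_false, Bool.false_eq_true]
    simp

theorem pvCutIndex_cons {p : List Char} {ps : List (List Char)}
    (h1 : ¬ p.any pvGlobChar = true) (h2 : ps ≠ []) :
    pvCutIndex (p :: ps) = pvCutIndex ps + 1 := by
  simp [pvCutIndex, h1, h2]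

-- the heart: the two cores agree, by strong induction peeling one '/'-component at a time
theorem pvRaw : ∀ (n : Nat) (cs : List Char), cs.length = n → pvCoreA cs = pvCoreB cs := by
  intro n
  induction n using Nat.strong_induction_on with
  | _ n ih =>
    intro cs hlen
    by_cases hs : '/' ∈ cs
    · -- cs = a ++ '/' :: r with '/' ∉ a
      have hsa : '/' ∉ cs.takeWhile (fun c => !(c == '/')) := fun hm => by
        have := List.mem_takeWhile_imp hm; simp at this
      have hdw : cs.dropWhile (fun c => !(c == '/')) ≠ [] := by
        intro h0
        have := List.dropWhile_eq_nil_iff.mp h0 '/' hs; simp at this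
      obtain ⟨y, r, hyr⟩ := List.exists_cons_of_ne_nil hdw
      have hy : y = '/' := by
        have := List.head?_dropWhile_not (fun c => !(c == '/')) cs
        rw [hyr] at this; simpa using this
      subst hy
      have hcs : cs = cs.takeWhile (fun c => !(c == '/')) ++ '/' :: r := by
        conv_lhs => rw [← List.takeWhile_append_dropWhile
          (p := fun c => !(c == '/')) (l := cs), hyr]
      set a := cs.takeWhile (fun c => !(c == '/')) with ha
      have hrlen : r.length < n := by
        have : cs.length = a.length + 1 + r.length := by
          conv_lhs => rw [hcs]
          simp; omega
        omega
      have hsplit : cs.splitOnP (· == '/') = a :: r.splitOnP (· == '/') := by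
        conv_lhs => rw [hcs]
        exact pvSplit_sep_append r hsa
      by_cases hg : a.any pvGlobChar
      · -- a glob char occurs before the first '/': both sides are none
        obtain ⟨x, hxa, hxg⟩ := List.any_eq_true.mp hg
        have htw : cs.takeWhile (fun c => !pvGlobChar c) =
            a.takeWhile (fun c => !pvGlobChar c) := by
          conv_lhs => rw [hcs]
          rw [List.takeWhile_append]
          have hne : (a.takeWhile (fun c => !pvGlobChar c)).length ≠ a.length := by
            intro h0
            have heq : a.takeWhile (fun c => !pvGlobChar c) = a :=
              (List.takeWhile_sublist _).eq_of_length h0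
            have := List.mem_takeWhile_imp (heq ▸ hxa)
            rw [hxg] at this
            simp at this
          simp only [hne, if_false]
        have hnp : '/' ∉ cs.takeWhile (fun c => !pvGlobChar c) := by
          rw [htw]
          intro hm
          exact hsa ((List.takeWhile_sublist _).subset hm)
        unfold pvCoreA pvCoreB
        rw [hsplit]
        simp [pvCutIndex, hg, hnp]
      · -- no glob before the first '/': recurse on r
        have hnb : ∀ x ∈ a, (fun c => !pvGlobChar c) x = true := by
          intro x hx
          have hno : pvGlobChar x = false := by
            by_contra hpos
            exact hg (List.any_eq_true.mpr ⟨x, hx, by simpa using hpos⟩)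
          simp [hno]
        have htw : cs.takeWhile (fun c => !pvGlobChar c) =
            a ++ '/' :: r.takeWhile (fun c => !pvGlobChar c) := by
          conv_lhs => rw [hcs]
          rw [List.takeWhile_append_of_pos hnb,
            List.takeWhile_cons_of_pos (by simp [pvGlobChar])]
        have hIH := ih r.length hrlen r rfl
        have hsr : r.splitOnP (· == '/') ≠ [] := List.splitOnP_ne_nil _ _
        unfold pvCoreA pvCoreB at hIH ⊢
        rw [hsplit, htw, pvCutIndex_cons hg hsr]
        rw [if_pos (by simp : '/' ∈ a ++ '/' :: r.takeWhile (fun c => !pvGlobChar c))]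
        rw [if_neg (Nat.succ_ne_zero _), List.take_succ_cons]
        by_cases hr : '/' ∈ r.takeWhile (fun c => !pvGlobChar c)
        · rw [if_pos hr] at hIH
          rw [pvRsplit_step hr]
          by_cases hc0 : pvCutIndex (r.splitOnP (· == '/')) = 0
          · simp [hc0] at hIH
          · rw [if_neg hc0] at hIH
            have hval := Option.some_inj.mp hIH
            obtain ⟨s0, st, hst⟩ := List.exists_cons_of_ne_nil hsr
            rw [hst] at hval hc0
            obtain ⟨k, hk⟩ := Nat.exists_eq_succ_of_ne_zero hc0
            rw [hval, hst, hk, List.take_succ_cons, PySem.Chars.join_cons_cons]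
            simp
        · rw [if_neg hr] at hIH
          have hc0 : pvCutIndex (r.splitOnP (· == '/')) = 0 := by
            by_contra hc
            rw [if_neg hc] at hIH
            simp at hIH
          rw [pvRsplit_last hr, hc0, List.take_zero, PySem.Chars.join_singleton]
    · -- no '/': both sides are none
      have hpfx : '/' ∉ cs.takeWhile (fun c => !pvGlobChar c) :=
        fun hm => hs ((List.takeWhile_sublist _).subset hm)
      unfold pvCoreA pvCoreB
      rw [pvSplit_no_sep hs]
      simp only [pvCutIndex]
      split_ifs with h1 h2 <;> simp_all

-- the bodies of the two ports after the shared guard agree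
theorem pvCore_eq (cs : List Char) :
    (let pfx := match pvFirstGlob cs 0 with
      | none => cs
      | some i => PySem.Chars.slice cs none (some (i : Int))
    if PySem.Chars.isIn ['/'] pfx then
      let d := pvRsplitHead pfx
      if d = [] then none else some (String.ofList d)
    else none) =
    (let parts := PySem.Chars.splitOn cs ['/']
    let cut := pvCutIndex parts
    let d := PySem.Chars.join ['/'] (PySem.List.slice parts none (some (cut : Int)))
    if d = [] then none else some (String.ofList d)) := by
  have hraw := pvRaw cs.length cs rfl
  unfold pvCoreA pvCoreB at hraw
  have hA : (match pvFirstGlob cs 0 with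
      | none => cs
      | some i => PySem.Chars.slice cs none (some (i : Int))) =
      cs.takeWhile (fun c => !pvGlobChar c) := by
    rw [← pvPrefix_eq cs]
    cases pvFirstGlob cs 0 <;> simp [PySem.List.slice_to_natCast]
  simp only [hA, pvSplitOn_single, PySem.List.slice_to_natCast]
  by_cases hm : '/' ∈ cs.takeWhile (fun c => !pvGlobChar c)
  · have hisin : PySem.Chars.isIn ['/'] (cs.takeWhile (fun c => !pvGlobChar c)) = true :=
      (PySem.Chars.isIn_iff_infix _ _).mpr ((List.singleton_infix_iff _ _).mpr hm)
    rw [hisin, if_pos hm] at *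
    simp only [if_true]
    by_cases hc0 : pvCutIndex (cs.splitOnP (· == '/')) = 0
    · rw [if_pos hc0] at hraw
      exact absurd hraw (by simp)
    · rw [if_neg hc0] at hraw
      rw [Option.some_inj.mp hraw]
  · have hisin : PySem.Chars.isIn ['/'] (cs.takeWhile (fun c => !pvGlobChar c)) = false :=
      (PySem.Chars.isIn_eq_false_iff _ _).mpr (fun hinf => hm ((List.singleton_infix_iff _ _).mp hinf))
    rw [if_neg hm] at hraw
    have hc0 : pvCutIndex (cs.splitOnP (· == '/')) = 0 := by
      by_contra hc
      rw [if_neg hc] at hraw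
      simp at hraw
    rw [hisin, hc0]
    simp [PySem.Chars.join_nil]

-- ===== VERDICT (by name: the statement is the Claim_ definition above) =====
theorem path_dir_hint_py_spec : Claim_equal_path_dir_hint_py := by
  intro value _
  unfold Spec_path_dir_hint_py path_dir_hint_py path_dir_hint_py_alt
  by_cases h : pvLooksLikePathValue (PySem.Str.strip value)
  · simp only [h, not_true_eq_false, if_false]
    exact pvCore_eq (PySem.Str.strip value).toList
  · simp [h]
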